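-- pv_equiv track=rewrite | github.com/raionsakana-tul-computer-science/ppkwu | zadanie_2/flask_app.py | count_big_letters
-- ===== SOURCE A (Python) =====
-- def count_big_letters(text: str):
--     index, mark = 0, False
--     temp_letters = [0]
--
--     for c in text:
--         if c.isupper():
--             temp_letters[index] = temp_letters[index] + 1
--             mark = True
--         else:
--             mark = False
--
--         if not mark:
--             index += 1
--             temp_letters.append(0)
--
--     letters = [c for c in temp_letters if c != 0]
--     return sum(letters), len(letters), letters
-- ===== SOURCE B (Python) =====
-- def count_big_letters(text: str):
--     ups = [c.isupper() for c in text]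
--     n = len(ups)
--     starts = [i for i in range(n) if ups[i] and (i == 0 or not ups[i - 1])]
--     ends = [i for i in range(n) if ups[i] and (i == n - 1 or not ups[i + 1])]
--     runs = [e - s + 1 for s, e in zip(starts, ends)]
--     return sum(runs), len(runs), runs
-- ===== Notes on version B (the rewrite author's own statement) =====
-- stated objective: alternative
-- what changed: Instead of scanning while accumulating run lengths (sentinel list, index pointer, mark flag), B computes the index lists of run starts and run ends over an isupper boolean table and derives each run length as end - start + 1 by zipping them.
import Mathlib
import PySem

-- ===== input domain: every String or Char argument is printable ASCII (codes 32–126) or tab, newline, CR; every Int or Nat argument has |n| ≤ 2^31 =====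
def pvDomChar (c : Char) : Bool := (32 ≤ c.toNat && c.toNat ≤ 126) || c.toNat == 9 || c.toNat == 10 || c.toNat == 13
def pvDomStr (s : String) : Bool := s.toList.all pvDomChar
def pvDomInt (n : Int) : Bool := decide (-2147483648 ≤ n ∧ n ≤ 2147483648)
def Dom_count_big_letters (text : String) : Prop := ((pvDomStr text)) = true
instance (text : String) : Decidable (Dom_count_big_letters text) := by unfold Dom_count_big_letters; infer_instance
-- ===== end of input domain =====

-- B computes run lengths from the boundary positions of uppercase runs (start/end index
-- lists zipped, length = end - start + 1) instead of A's accumulating scan (objective: alternative).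

-- ===== PORT A =====
-- the for-loop of A as structural recursion over the same state (index, mark, temp_letters)
def cblLoopA : List Char → Int → Bool → List Int → List Int
  | [], _, _, temp => temp
  | c :: cs, index, _, temp =>
    if PySem.Chars.isupper c then
      -- temp_letters[index] += 1; mark = True (so the "if not mark" branch is skipped)
      cblLoopA cs index true (temp.set index.toNat (temp.getD index.toNat 0 + 1))
    else
      -- mark = False, then index += 1; temp_letters.append(0)
      cblLoopA cs (index + 1) false (temp ++ [0])

def count_big_letters (text : String) : Int × Int × List Int :=
  let temp_letters := cblLoopA text.toList 0 false [0]
  let letters := temp_letters.filter (fun c => c != 0)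
  (letters.sum, (letters.length : Int), letters)

-- ===== PORT B =====
-- ups = [c.isupper() for c in text]; starts/ends are filtered index ranges; runs by zip.
-- ups[i-1] / ups[i+1] are only read under guards that keep the index in range, so getD is exact.
def count_big_letters_alt (text : String) : Int × Int × List Int :=
  let ups := text.toList.map PySem.Chars.isupper
  let n := ups.length
  let starts := (List.range n).filter
    (fun i => ups.getD i false && (decide (i = 0) || !(ups.getD (i - 1) false)))
  let ends := (List.range n).filter
    (fun i => ups.getD i false && (decide (i = n - 1) || !(ups.getD (i + 1) false)))
  let runs := (starts.zip ends).map (fun p => ((p.2 : Int) - (p.1 : Int) + 1))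
  (runs.sum, (runs.length : Int), runs)

-- ===== PRECONDITION & SPEC =====
def Spec_count_big_letters (text : String) (out : Int × Int × List Int) : Prop := out = count_big_letters_alt text
instance (text : String) (out : Int × Int × List Int) : Decidable (Spec_count_big_letters text out) := by unfold Spec_count_big_letters; infer_instance

-- ===== CLAIM (what is proved, stated in full; the proofs are below) =====
def Claim_equal_count_big_letters : Prop := ∀ (text : String), Dom_count_big_letters text → Spec_count_big_letters text (count_big_letters text)

-- ===== LEMMAS AND PROOFS =====

-- the uppercase run lengths of a character list, one maximal uppercase group at a time
def cblGroupRuns : List Char → List Int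
  | [] => []
  | c :: cs =>
    if PySem.Chars.isupper c then
      ((1 + (cs.takeWhile (fun d => PySem.Chars.isupper d)).length : Int) ::
        cblGroupRuns (cs.dropWhile (fun d => PySem.Chars.isupper d)))
    else cblGroupRuns cs
  termination_by l => l.length
  decreasing_by
    · exact Nat.lt_succ_of_le (List.length_dropWhile_le _ _)
    · exact Nat.lt_succ_self _

theorem cblGroupRuns_nil : cblGroupRuns [] = [] := by rw [cblGroupRuns.eq_def]

theorem cblGroupRuns_cons_true {c : Char} (cs : List Char) (h : PySem.Chars.isupper c = true) :
    cblGroupRuns (c :: cs) =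
      ((1 : Int) + ((cs.takeWhile (fun d => PySem.Chars.isupper d)).length : Int)) ::
        cblGroupRuns (cs.dropWhile (fun d => PySem.Chars.isupper d)) := by
  rw [cblGroupRuns.eq_def]; simp [h]

theorem cblGroupRuns_cons_false {c : Char} (cs : List Char) (h : PySem.Chars.isupper c = false) :
    cblGroupRuns (c :: cs) = cblGroupRuns cs := by
  rw [cblGroupRuns.eq_def]; simp [h]

-- ---------- A-side: the loop produces the run-length list with zero separators ----------

-- the suffix of temp_letters that A's loop will still produce, given the current run counter
def cblRunsFrom (cur : Int) : List Char → List Int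
  | [] => [cur]
  | c :: cs => if PySem.Chars.isupper c then cblRunsFrom (cur + 1) cs else cur :: cblRunsFrom 0 cs

theorem cblLoopA_eq (cs : List Char) : ∀ (mark : Bool) (init : List Int) (cur : Int),
    cblLoopA cs (init.length : Int) mark (init ++ [cur]) = init ++ cblRunsFrom cur cs := by
  induction cs with
  | nil => intro mark init cur; simp [cblLoopA, cblRunsFrom]
  | cons c cs ih =>
    intro mark init cur
    by_cases h : PySem.Chars.isupper c = true
    · have hset : (init ++ [cur]).set init.length (cur + 1) = init ++ [cur + 1] := by simp
      have hget : (init ++ [cur]).getD init.length 0 = cur := by simp [List.getD]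
      simp only [cblLoopA, h, if_true, Int.toNat_natCast, hget, hset, cblRunsFrom]
      exact ih true init (cur + 1)
    · simp only [cblLoopA, h, if_false, cblRunsFrom, Bool.false_eq_true]
      have : init ++ [cur] ++ [(0 : Int)] = (init ++ [cur]) ++ [(0 : Int)] := rfl
      rw [this]
      have hlen : ((init.length : Int) + 1) = ((init ++ [cur]).length : Int) := by simp
      rw [hlen, ih false (init ++ [cur]) 0]
      simp

-- joint characterisation of the filtered temp_letters suffix
theorem cblRunsFrom_filter (cs : List Char) :
    ((cblRunsFrom 0 cs).filter (fun c => c != 0) = cblGroupRuns cs) ∧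
    (∀ cur : Int, 0 < cur →
      (cblRunsFrom cur cs).filter (fun c => c != 0) =
        (cur + ((cs.takeWhile (fun d => PySem.Chars.isupper d)).length : Int)) ::
          cblGroupRuns (cs.dropWhile (fun d => PySem.Chars.isupper d))) := by
  induction cs with
  | nil =>
    constructor
    · simp [cblRunsFrom, cblGroupRuns_nil]
    · intro cur hcur
      rw [show cblRunsFrom cur [] = [cur] from rfl]
      rw [List.filter_cons_of_pos (by simp; omega)]
      simp [cblGroupRuns_nil]
  | cons c cs ih =>
    obtain ⟨ih0, ihp⟩ := ih
    by_cases h : PySem.Chars.isupper c = true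
    constructor
    · rw [show cblRunsFrom 0 (c :: cs) = cblRunsFrom 1 cs by simp [cblRunsFrom, h]]
      rw [ihp 1 one_pos, cblGroupRuns_cons_true cs h]
    · intro cur hcur
      rw [show cblRunsFrom cur (c :: cs) = cblRunsFrom (cur + 1) cs by simp [cblRunsFrom, h]]
      rw [ihp (cur + 1) (by omega)]
      rw [List.takeWhile_cons_of_pos (by simp [h]), List.dropWhile_cons_of_pos (by simp [h])]
      congr 1
      simp only [List.length_cons]
      push_cast
      omega
    · have h' : PySem.Chars.isupper c = false := by simpa using h
      constructor
      · rw [show cblRunsFrom 0 (c :: cs) = 0 :: cblRunsFrom 0 cs by simp [cblRunsFrom, h']]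
        rw [List.filter_cons_of_neg (by simp)]
        rw [ih0, cblGroupRuns_cons_false cs h']
      · intro cur hcur
        rw [show cblRunsFrom cur (c :: cs) = cur :: cblRunsFrom 0 cs by simp [cblRunsFrom, h']]
        rw [List.filter_cons_of_pos (by simp; omega)]
        rw [ih0]
        rw [List.takeWhile_cons_of_neg (by simp [h']), List.dropWhile_cons_of_neg (by simp [h'])]
        rw [cblGroupRuns_cons_false cs h']
        simp

-- ---------- B-side: the filtered index ranges as structural recursions ----------

-- run-start positions: a position is a start iff it is uppercase and the previous one is not
def cblS : Bool → List Bool → List Nat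
  | _, [] => []
  | prev, b :: bs => (if b && !prev then [0] else []) ++ (cblS b bs).map (· + 1)

-- run-end positions: a position is an end iff it is uppercase and the next one is not
def cblE : List Bool → List Nat
  | [] => []
  | b :: bs => (if b && !(bs.headD false) then [0] else []) ++ (cblE bs).map (· + 1)

theorem cblFilterRange_succ (n : Nat) (p : Nat → Bool) :
    (List.range (n + 1)).filter p =
      (if p 0 then [0] else []) ++ ((List.range n).filter (fun i => p (i + 1))).map (· + 1) := by
  rw [List.range_succ_eq_map, List.filter_cons, List.filter_map]
  split <;> simp [Function.comp_def]

theorem cblStarts_eq : ∀ (bs : List Bool) (prev : Bool),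
    (List.range bs.length).filter
        (fun i => bs.getD i false && !((prev :: bs).getD i false)) = cblS prev bs := by
  intro bs
  induction bs with
  | nil => intro prev; rfl
  | cons b bs ih =>
    intro prev
    rw [List.length_cons, cblFilterRange_succ]
    simp only [List.getD_cons_zero, List.getD_cons_succ]
    rw [ih b]
    simp [cblS]

theorem cblEnds_eq : ∀ (bs : List Bool),
    (List.range bs.length).filter
        (fun i => bs.getD i false && (decide (i = bs.length - 1) || !(bs.getD (i + 1) false)))
      = cblE bs := by
  intro bs
  induction bs with
  | nil => rfl
  | cons b bs ih =>
    rw [List.length_cons, cblFilterRange_succ]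
    simp only [List.getD_cons_zero, List.getD_cons_succ]
    have hpred : ∀ i ∈ List.range bs.length,
        (bs.getD i false && (decide (i + 1 = bs.length + 1 - 1) || !(bs.getD (i + 1) false)))
          = (bs.getD i false && (decide (i = bs.length - 1) || !(bs.getD (i + 1) false))) := by
      intro i hi
      have hilt := List.mem_range.mp hi
      have hd : decide (i + 1 = bs.length + 1 - 1) = decide (i = bs.length - 1) := by
        rw [decide_eq_decide]
        omega
      rw [hd]
    rw [List.filter_congr hpred, ih]
    have h0 : (b && (decide ((0:Nat) = bs.length + 1 - 1) || !(bs.getD 0 false)))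
        = (b && !(bs.headD false)) := by
      cases bs <;> simp
    rw [h0]
    simp [cblE]

-- behaviour of start/end lists over a maximal uppercase prefix
theorem cblS_true (bs : List Bool) :
    cblS true bs =
      (cblS false (bs.dropWhile (· == true))).map (· + (bs.takeWhile (· == true)).length) := by
  induction bs with
  | nil => simp [cblS]
  | cons b bs ih =>
    cases b with
    | false =>
      simp [cblS, List.takeWhile, List.dropWhile]
    | true =>
      rw [show cblS true (true :: bs) = (cblS true bs).map (· + 1) by simp [cblS]]
      rw [ih, List.map_map]
      simp [List.takeWhile, List.dropWhile]

theorem cblE_true_cons (bs : List Bool) :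
    cblE (true :: bs) =
      (bs.takeWhile (· == true)).length ::
        (cblE (bs.dropWhile (· == true))).map (· + ((bs.takeWhile (· == true)).length + 1)) := by
  induction bs with
  | nil => simp [cblE]
  | cons b bs ih =>
    cases b with
    | false =>
      simp [cblE, List.takeWhile, List.dropWhile]
    | true =>
      rw [show cblE (true :: true :: bs) = (cblE (true :: bs)).map (· + 1) by simp [cblE]]
      rw [ih]
      simp [List.takeWhile, List.dropWhile, List.map_map]

-- uppercase run lengths of the boolean table, one position or one group at a time
def cblRunsB : List Bool → List Nat
  | [] => []
  | b :: bs =>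
    if b then (1 + (bs.takeWhile (· == true)).length) :: cblRunsB (bs.dropWhile (· == true))
    else cblRunsB bs
  termination_by l => l.length
  decreasing_by
    · exact Nat.lt_succ_of_le (List.length_dropWhile_le _ _)
    · exact Nat.lt_succ_self _

theorem cblZip_map_shift (l₁ l₂ : List Nat) (m : Nat) :
    (((l₁.map (· + m)).zip (l₂.map (· + m))).map (fun p => ((p.2 : Int) - (p.1 : Int) + 1)))
      = ((l₁.zip l₂).map (fun p => ((p.2 : Int) - (p.1 : Int) + 1))) := by
  rw [List.zip_map, List.map_map]
  apply List.map_congr_left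
  intro p _
  obtain ⟨a, b⟩ := p
  simp only [Prod.map, Function.comp]
  push_cast
  ring

theorem cblZip_eq_runs : ∀ (n : Nat) (bs : List Bool), bs.length ≤ n →
    ((cblS false bs).zip (cblE bs)).map (fun p => ((p.2 : Int) - (p.1 : Int) + 1))
      = (cblRunsB bs).map (fun k => Int.ofNat k) := by
  intro n
  induction n with
  | zero =>
    intro bs hb
    have : bs = [] := List.eq_nil_of_length_eq_zero (Nat.le_zero.mp hb)
    subst this
    simp [cblS, cblE, cblRunsB]
  | succ n ih =>
    intro bs hb
    cases bs with
    | nil => simp [cblS, cblE, cblRunsB]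
    | cons b bs =>
      cases b with
      | false =>
        rw [show cblS false (false :: bs) = (cblS false bs).map (· + 1) by simp [cblS]]
        rw [show cblE (false :: bs) = (cblE bs).map (· + 1) by simp [cblE]]
        rw [cblZip_map_shift]
        rw [show cblRunsB (false :: bs) = cblRunsB bs by rw [cblRunsB.eq_def]; simp]
        exact ih bs (by simpa using Nat.lt_succ_iff.mp (Nat.lt_of_lt_of_le (by simp) hb))
      | true =>
        have hk : cblS false (true :: bs)
            = 0 :: (cblS false (bs.dropWhile (· == true))).map
                (· + ((bs.takeWhile (· == true)).length + 1)) := by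
          rw [show cblS false (true :: bs) = 0 :: (cblS true bs).map (· + 1) by simp [cblS]]
          rw [cblS_true, List.map_map]
          simp
        rw [hk, cblE_true_cons, List.zip_cons_cons, List.map_cons, cblZip_map_shift]
        rw [show cblRunsB (true :: bs)
            = (1 + (bs.takeWhile (· == true)).length) :: cblRunsB (bs.dropWhile (· == true)) by
          rw [cblRunsB.eq_def]; simp]
        rw [List.map_cons]
        congr 1
        · push_cast [Int.ofNat_eq_natCast]; ring
        · exact ih _ (by
            have := List.length_dropWhile_le (· == true) bs
            simp only [List.length_cons] at hb
            omega)

-- the boolean-table runs are exactly the character-list runs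
theorem cblRunsB_map (cs : List Char) :
    (cblRunsB (cs.map PySem.Chars.isupper)).map (fun k => Int.ofNat k) = cblGroupRuns cs := by
  induction hn : cs.length using Nat.strong_induction_on generalizing cs with
  | _ n ih =>
    cases cs with
    | nil => simp [cblRunsB, cblGroupRuns_nil]
    | cons c cs =>
      by_cases h : PySem.Chars.isupper c = true
      · rw [List.map_cons, h]
        rw [show cblRunsB (true :: cs.map PySem.Chars.isupper)
            = (1 + ((cs.map PySem.Chars.isupper).takeWhile (· == true)).length)
              :: cblRunsB ((cs.map PySem.Chars.isupper).dropWhile (· == true)) by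
          rw [cblRunsB.eq_def]; simp]
        rw [cblGroupRuns_cons_true cs h, List.map_cons]
        have htw : (cs.map PySem.Chars.isupper).takeWhile (· == true)
            = (cs.takeWhile (fun d => PySem.Chars.isupper d)).map PySem.Chars.isupper := by
          rw [List.takeWhile_map]; simp [Function.comp_def]
        have hdw : (cs.map PySem.Chars.isupper).dropWhile (· == true)
            = (cs.dropWhile (fun d => PySem.Chars.isupper d)).map PySem.Chars.isupper := by
          rw [List.dropWhile_map]; simp [Function.comp_def]
        congr 1
        · rw [htw, List.length_map]; push_cast [Int.ofNat_eq_natCast]; ring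
        · rw [hdw]
          subst hn
          exact ih (cs.dropWhile (fun d => PySem.Chars.isupper d)).length
            (Nat.lt_succ_of_le (List.length_dropWhile_le _ _)) _ rfl
      · have h' : PySem.Chars.isupper c = false := by simpa using h
        rw [List.map_cons, h']
        rw [show cblRunsB (false :: cs.map PySem.Chars.isupper)
            = cblRunsB (cs.map PySem.Chars.isupper) by rw [cblRunsB.eq_def]; simp]
        rw [cblGroupRuns_cons_false cs h']
        subst hn
        exact ih cs.length (Nat.lt_succ_self _) _ rfl

-- B's runs list is cblGroupRuns
theorem cblAlt_runs (cs : List Char) :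
    ((((List.range (cs.map PySem.Chars.isupper).length).filter
        (fun i => (cs.map PySem.Chars.isupper).getD i false &&
          (decide (i = 0) || !((cs.map PySem.Chars.isupper).getD (i - 1) false)))).zip
      ((List.range (cs.map PySem.Chars.isupper).length).filter
        (fun i => (cs.map PySem.Chars.isupper).getD i false &&
          (decide (i = (cs.map PySem.Chars.isupper).length - 1) ||
            !((cs.map PySem.Chars.isupper).getD (i + 1) false))))).map
        (fun p => ((p.2 : Int) - (p.1 : Int) + 1)))
      = cblGroupRuns cs := by
  set bs := cs.map PySem.Chars.isupper with hbs
  have hs : (List.range bs.length).filter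
      (fun i => bs.getD i false && (decide (i = 0) || !(bs.getD (i - 1) false)))
      = cblS false bs := by
    rw [← cblStarts_eq bs false]
    apply List.filter_congr
    intro i _
    cases i with
    | zero => simp
    | succ j => simp
  rw [hs, cblEnds_eq, cblZip_eq_runs bs.length bs le_rfl, hbs, cblRunsB_map]

-- ===== VERDICT (by name: the statement is the Claim_ definition above) =====
theorem count_big_letters_spec : Claim_equal_count_big_letters := by
  intro text _
  unfold Spec_count_big_letters count_big_letters count_big_letters_alt
  have h0 : cblLoopA text.toList 0 false [0] = cblRunsFrom 0 text.toList := by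
    simpa using cblLoopA_eq text.toList false [] 0
  simp only [h0, (cblRunsFrom_filter text.toList).1, cblAlt_runs]
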